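-- pv_equiv track=rewrite | github.com/Flyhr/erise-ai | AiAssistant/src/app/services/context_service.py | _resolve_attachment_readiness
-- ===== SOURCE A (Python) =====
-- READY_STATUSES = {'READY', 'SUCCESS', 'INDEXED', 'COMPLETED'}
--
-- PROCESSING_STATUSES = {'PROCESSING'}
--
-- PENDING_STATUSES = {'INIT', 'PENDING', 'UPLOADING'}
--
-- FAILED_STATUSES = {'FAILED', 'DELETED'}
--
-- def _resolve_attachment_readiness(parse_status: str, index_status: str, has_material: bool) -> str:
--     if has_material:
--         return 'ready'
--
--     statuses = [status for status in (parse_status, index_status) if status]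
--     if not statuses:
--         return 'empty'
--     if any(status in FAILED_STATUSES for status in statuses):
--         return 'failed'
--     if any(status in PROCESSING_STATUSES for status in statuses):
--         return 'processing'
--     if any(status in READY_STATUSES for status in statuses):
--         return 'empty'
--     if any(status in PENDING_STATUSES for status in statuses):
--         return 'pending'
--     return 'empty'
-- ===== SOURCE B (Python) =====
-- RANK = {'FAILED': 4, 'DELETED': 4, 'PROCESSING': 3,
--         'READY': 2, 'SUCCESS': 2, 'INDEXED': 2, 'COMPLETED': 2,
--         'INIT': 1, 'PENDING': 1, 'UPLOADING': 1}
--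
-- OUTCOME = {4: 'failed', 3: 'processing', 2: 'empty', 1: 'pending', 0: 'empty'}
--
--
-- def _resolve_attachment_readiness(parse_status: str, index_status: str, has_material: bool) -> str:
--     if has_material:
--         return 'ready'
--     rank = max((RANK.get(s, 0) for s in (parse_status, index_status) if s), default=0)
--     return OUTCOME[rank]
-- ===== Notes on version B (the rewrite author's own statement) =====
-- stated objective: simpler
-- what changed: Replaces the early-return chain of any()-membership scans over four status sets by one severity-rank dict: each present status is mapped to a numeric severity, the maximum severity picks the verdict from a table (ready-category statuses and unknown statuses both resolve to 'empty').
import Mathlib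
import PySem

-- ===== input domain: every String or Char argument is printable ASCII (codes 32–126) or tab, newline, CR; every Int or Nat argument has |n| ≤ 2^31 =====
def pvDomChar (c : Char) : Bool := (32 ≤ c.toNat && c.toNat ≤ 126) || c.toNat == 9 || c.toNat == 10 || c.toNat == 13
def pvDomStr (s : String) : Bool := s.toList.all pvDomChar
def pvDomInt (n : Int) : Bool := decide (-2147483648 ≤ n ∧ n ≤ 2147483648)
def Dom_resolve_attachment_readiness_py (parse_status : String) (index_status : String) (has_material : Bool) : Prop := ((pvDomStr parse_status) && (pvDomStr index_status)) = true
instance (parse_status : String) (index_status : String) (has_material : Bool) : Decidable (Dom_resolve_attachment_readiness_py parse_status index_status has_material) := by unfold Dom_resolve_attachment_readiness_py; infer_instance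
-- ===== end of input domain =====

-- B replaces A's early-return chain of any()-membership scans over four status
-- sets by one severity-rank dict and a max; objective: simpler.

-- ===== PORT A =====
def pvREADY : PySem.Set String := PySem.Set.ofList ["READY", "SUCCESS", "INDEXED", "COMPLETED"]
def pvPROCESSING : PySem.Set String := PySem.Set.ofList ["PROCESSING"]
def pvPENDING : PySem.Set String := PySem.Set.ofList ["INIT", "PENDING", "UPLOADING"]
def pvFAILED : PySem.Set String := PySem.Set.ofList ["FAILED", "DELETED"]

def resolve_attachment_readiness_py (parse_status : String) (index_status : String) (has_material : Bool) : String :=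
  if has_material then "ready"
  else
    -- [status for status in (parse_status, index_status) if status]
    let statuses : List String :=
      (if parse_status ≠ "" then [parse_status] else []) ++
      (if index_status ≠ "" then [index_status] else [])
    if statuses = [] then "empty"
    else if statuses.any (fun s => pvFAILED.contains s) then "failed"
    else if statuses.any (fun s => pvPROCESSING.contains s) then "processing"
    else if statuses.any (fun s => pvREADY.contains s) then "empty"
    else if statuses.any (fun s => pvPENDING.contains s) then "pending"
    else "empty"

-- ===== PORT B =====
def pvRANK : PySem.Dict String Int := PySem.Dict.ofList
  [("FAILED", 4), ("DELETED", 4), ("PROCESSING", 3),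
   ("READY", 2), ("SUCCESS", 2), ("INDEXED", 2), ("COMPLETED", 2),
   ("INIT", 1), ("PENDING", 1), ("UPLOADING", 1)]

def pvOUTCOME : PySem.Dict Int String := PySem.Dict.ofList
  [(4, "failed"), (3, "processing"), (2, "empty"), (1, "pending"), (0, "empty")]

def resolve_attachment_readiness_py_alt (parse_status : String) (index_status : String) (has_material : Bool) : String :=
  if has_material then "ready"
  else
    -- max((RANK.get(s, 0) for s in (parse_status, index_status) if s), default=0)
    let rank : Int :=
      (((if parse_status ≠ "" then [parse_status] else []) ++
        (if index_status ≠ "" then [index_status] else [])).map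
          (fun s => pvRANK.getD s 0)).foldl max 0
    -- OUTCOME[rank]: rank is always a key of OUTCOME, so the KeyError branch (none) is unreachable
    (pvOUTCOME.get? rank).getD ""

-- ===== PRECONDITION & SPEC =====
def Spec_resolve_attachment_readiness_py (parse_status : String) (index_status : String) (has_material : Bool) (out : String) : Prop := out = resolve_attachment_readiness_py_alt parse_status index_status has_material
instance (parse_status : String) (index_status : String) (has_material : Bool) (out : String) : Decidable (Spec_resolve_attachment_readiness_py parse_status index_status has_material out) := by unfold Spec_resolve_attachment_readiness_py; infer_instance

-- ===== CLAIM (what is proved, stated in full; the proofs are below) =====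
def Claim_equal_resolve_attachment_readiness_py : Prop := ∀ (parse_status : String) (index_status : String) (has_material : Bool), Dom_resolve_attachment_readiness_py parse_status index_status has_material → Spec_resolve_attachment_readiness_py parse_status index_status has_material (resolve_attachment_readiness_py parse_status index_status has_material)

-- ===== LEMMAS AND PROOFS =====

-- the rank lookup, characterised as a chain of equality tests
theorem pv_single (s : String) :
    pvRANK.getD s 0 =
      (if s = "FAILED" then 4 else if s = "DELETED" then 4 else if s = "PROCESSING" then 3
       else if s = "READY" then 2 else if s = "SUCCESS" then 2 else if s = "INDEXED" then 2
       else if s = "COMPLETED" then 2 else if s = "INIT" then 1 else if s = "PENDING" then 1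
       else if s = "UPLOADING" then (1 : Int) else 0) := by
  have hitems : pvRANK.items = [("FAILED",(4:Int)),("DELETED",4),("PROCESSING",3),("READY",2),("SUCCESS",2),("INDEXED",2),("COMPLETED",2),("INIT",1),("PENDING",1),("UPLOADING",1)] := by rfl
  simp only [PySem.Dict.getD, PySem.Dict.get?, hitems, List.find?]
  split_ifs with h1 h2 h3 h4 h5 h6 h7 h8 h9 h10 <;> subst_vars <;>
    first
      | rfl
      | simp only [beq_eq_false_iff_ne.mpr (Ne.symm h1), beq_eq_false_iff_ne.mpr (Ne.symm h2),
          beq_eq_false_iff_ne.mpr (Ne.symm h3), beq_eq_false_iff_ne.mpr (Ne.symm h4),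
          beq_eq_false_iff_ne.mpr (Ne.symm h5), beq_eq_false_iff_ne.mpr (Ne.symm h6),
          beq_eq_false_iff_ne.mpr (Ne.symm h7), beq_eq_false_iff_ne.mpr (Ne.symm h8),
          beq_eq_false_iff_ne.mpr (Ne.symm h9), beq_eq_false_iff_ne.mpr (Ne.symm h10),
          Option.map, Option.getD]

theorem pv_bounds (s : String) : 0 ≤ pvRANK.getD s 0 ∧ pvRANK.getD s 0 ≤ 4 := by
  rw [pv_single]; split_ifs <;> omega

theorem pv4 (s : String) : (s = "FAILED" ∨ s = "DELETED") ↔ pvRANK.getD s 0 = 4 := by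
  rw [pv_single]; split_ifs <;> simp_all

theorem pv3 (s : String) : s = "PROCESSING" ↔ pvRANK.getD s 0 = 3 := by
  rw [pv_single]; split_ifs <;> simp_all

theorem pv2 (s : String) : (s = "READY" ∨ s = "SUCCESS" ∨ s = "INDEXED" ∨ s = "COMPLETED") ↔ pvRANK.getD s 0 = 2 := by
  rw [pv_single]; split_ifs <;> simp_all

theorem pv1 (s : String) : (s = "INIT" ∨ s = "PENDING" ∨ s = "UPLOADING") ↔ pvRANK.getD s 0 = 1 := by
  rw [pv_single]; split_ifs <;> simp_all

set_option maxHeartbeats 1000000 in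
theorem pv_one (s : String) (hs : s ≠ "") :
    resolve_attachment_readiness_py s "" false = resolve_attachment_readiness_py_alt s "" false := by
  have eF : pvFAILED = ["FAILED", "DELETED"] := by decide
  have eP : pvPROCESSING = ["PROCESSING"] := by decide
  have eR : pvREADY = ["READY", "SUCCESS", "INDEXED", "COMPLETED"] := by decide
  have eN : pvPENDING = ["INIT", "PENDING", "UPLOADING"] := by decide
  simp only [resolve_attachment_readiness_py, resolve_attachment_readiness_py_alt]
  simp [hs, PySem.Set.contains, eF, eP, eR, eN]
  simp only [pv4, pv3, pv2, pv1]
  have hap := pv_bounds s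
  set a := pvRANK.getD s 0 with hA
  split_ifs with h1 h2 h3 h4
  · rw [show max 0 a = 4 from by omega]; decide
  · rw [show max 0 a = 3 from by omega]; decide
  · rw [show max 0 a = 2 from by omega]; decide
  · rw [show max 0 a = 1 from by omega]; decide
  · rw [show max 0 a = 0 from by omega]; decide

set_option maxHeartbeats 1000000 in
theorem pv_one' (s : String) (hs : s ≠ "") :
    resolve_attachment_readiness_py "" s false = resolve_attachment_readiness_py_alt "" s false := by
  have eF : pvFAILED = ["FAILED", "DELETED"] := by decide
  have eP : pvPROCESSING = ["PROCESSING"] := by decide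
  have eR : pvREADY = ["READY", "SUCCESS", "INDEXED", "COMPLETED"] := by decide
  have eN : pvPENDING = ["INIT", "PENDING", "UPLOADING"] := by decide
  simp only [resolve_attachment_readiness_py, resolve_attachment_readiness_py_alt]
  simp [hs, PySem.Set.contains, eF, eP, eR, eN]
  simp only [pv4, pv3, pv2, pv1]
  have hap := pv_bounds s
  set a := pvRANK.getD s 0 with hA
  split_ifs with h1 h2 h3 h4
  · rw [show max 0 a = 4 from by omega]; decide
  · rw [show max 0 a = 3 from by omega]; decide
  · rw [show max 0 a = 2 from by omega]; decide
  · rw [show max 0 a = 1 from by omega]; decide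
  · rw [show max 0 a = 0 from by omega]; decide

set_option maxHeartbeats 1000000 in
theorem pv_two (p i : String) (hp : p ≠ "") (hi : i ≠ "") :
    resolve_attachment_readiness_py p i false = resolve_attachment_readiness_py_alt p i false := by
  have eF : pvFAILED = ["FAILED", "DELETED"] := by decide
  have eP : pvPROCESSING = ["PROCESSING"] := by decide
  have eR : pvREADY = ["READY", "SUCCESS", "INDEXED", "COMPLETED"] := by decide
  have eN : pvPENDING = ["INIT", "PENDING", "UPLOADING"] := by decide
  simp only [resolve_attachment_readiness_py, resolve_attachment_readiness_py_alt]
  simp [hp, hi, PySem.Set.contains, eF, eP, eR, eN]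
  simp only [pv4, pv3, pv2, pv1]
  have hap := pv_bounds p
  have hai := pv_bounds i
  set a := pvRANK.getD p 0 with hA
  set b := pvRANK.getD i 0 with hB
  split_ifs with h1 h2 h3 h4
  · rw [show max 0 (max a b) = 4 from by omega]; decide
  · rw [show max 0 (max a b) = 3 from by omega]; decide
  · rw [show max 0 (max a b) = 2 from by omega]; decide
  · rw [show max 0 (max a b) = 1 from by omega]; decide
  · rw [show max 0 (max a b) = 0 from by omega]; decide

-- ===== VERDICT (by name: the statement is the Claim_ definition above) =====
theorem resolve_attachment_readiness_py_spec : Claim_equal_resolve_attachment_readiness_py := by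
  intro p i h _
  unfold Spec_resolve_attachment_readiness_py
  cases h with
  | true => rfl
  | false =>
    by_cases hp : p = "" <;> by_cases hi : i = ""
    · subst hp; subst hi; decide
    · subst hp; exact pv_one' i hi
    · subst hi; exact pv_one p hp
    · exact pv_two p i hp hi
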